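-- pv_equiv track=rewrite | github.com/yongwoo97/algorithm | gold/1528_금민수의 합.py | func
-- ===== SOURCE A (Python) =====
-- def func(count, pre):
--     result = []
--     if count == 0:
--         return []
--     for i in ['4', '7']:
--         result.append(int(pre + i))
--         result += func(count - 1, pre + i)
--     return result
-- ===== SOURCE B (Python) =====
-- def func(count, pre):
--     # Build all 4/7-digit suffixes breadth-first, then sort lexicographically
--     # (string order = A's DFS preorder) and convert each to int.
--     suffixes = []
--     words = ['']
--     for _ in range(count):
--         words = [w + d for w in words for d in ['4', '7']]
--         suffixes += words
--     suffixes.sort()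
--     return [int(pre + s) for s in suffixes]
-- ===== Notes on version B (the rewrite author's own statement) =====
-- stated objective: alternative
-- what changed: Replaces A's recursive DFS (append int(pre+digit), recurse) by a breadth-first generation of all 4/7-digit suffix layers followed by one lexicographic string sort, whose order equals the DFS preorder, then a single int() mapping pass.
import Mathlib
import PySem

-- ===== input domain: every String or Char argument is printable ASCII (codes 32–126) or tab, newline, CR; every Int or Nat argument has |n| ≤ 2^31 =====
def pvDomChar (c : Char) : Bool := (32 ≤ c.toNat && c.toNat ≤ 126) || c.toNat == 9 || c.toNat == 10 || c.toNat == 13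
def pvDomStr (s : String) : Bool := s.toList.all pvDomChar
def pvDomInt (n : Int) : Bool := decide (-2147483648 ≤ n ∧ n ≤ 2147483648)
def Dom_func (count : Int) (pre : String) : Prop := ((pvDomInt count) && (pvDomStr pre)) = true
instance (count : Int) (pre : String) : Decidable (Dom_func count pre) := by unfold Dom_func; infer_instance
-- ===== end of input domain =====

-- B replaces A's recursive DFS by breadth-first generation of all 4/7-digit
-- suffixes followed by one lexicographic sort (string order = A's DFS preorder);
-- objective: alternative decomposition, same exponential output cost.

-- ===== PORT A =====
-- A recurses on count-1; ported with fuel count.toNat (for count < 0 the Python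
-- raises RecursionError, excluded by Pre_func). int(pre+i) is PySem.Int.ofStr?;
-- its failure (ValueError) is excluded by Pre_func, so the .getD 0 default is
-- never taken inside Pre_func.
def funcAuxA : Nat → String → List Int
  | 0, _ => []
  | n + 1, pre =>
      ["4", "7"].foldl
        (fun result i =>
          (result ++ [(PySem.Int.ofStr? (pre ++ i)).getD 0]) ++ funcAuxA n (pre ++ i))
        []

def func (count : Int) (pre : String) : List Int :=
  funcAuxA count.toNat pre

-- ===== PORT B =====
def func_alt (count : Int) (pre : String) : List Int :=
  let st :=
    (PySem.List.pyRange 0 count 1).foldl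
      (fun (st : List String × List String) _ =>
        let words := st.2.flatMap (fun w => ["4", "7"].map (fun d => w ++ d))
        (st.1 ++ words, words))
      ([], [""])
  (PySem.List.sorted st.1 (fun s => s) false).map
    (fun s => (PySem.Int.ofStr? (pre ++ s)).getD 0)

-- ===== PRECONDITION & SPEC =====
-- Pre_func is exactly where the Python A returns: count ≥ 0 (a negative count
-- recurses to RecursionError) and, unless count = 0 (A returns [] at once),
-- pre + '4' must parse as an int (otherwise int() raises ValueError).
def Pre_func (count : Int) (pre : String) : Prop :=
  0 ≤ count ∧ (count = 0 ∨ (PySem.Int.ofStr? (pre ++ "4")).isSome = true)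
instance (count : Int) (pre : String) : Decidable (Pre_func count pre) := by
  unfold Pre_func; infer_instance

def pvWitness_func : Int × String := (3, "1")

def Spec_func (count : Int) (pre : String) (out : List Int) : Prop := out = func_alt count pre
instance (count : Int) (pre : String) (out : List Int) : Decidable (Spec_func count pre out) := by unfold Spec_func; infer_instance

-- ===== CLAIM (what is proved, stated in full; the proofs are below) =====
def Claim_equal_func : Prop := ∀ (count : Int) (pre : String), Dom_func count pre → Pre_func count pre → Spec_func count pre (func count pre)

-- ===== LEMMAS AND PROOFS =====

-- the DFS preorder list of suffixes that A's recursion explores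
def dfs : Nat → List String
  | 0 => []
  | n + 1 =>
      "4" :: ((dfs n).map ("4" ++ ·) ++ ("7" :: (dfs n).map ("7" ++ ·)))

-- one breadth-first layer step of B, and the layers / their concatenation
def stepW (ws : List String) : List String :=
  ws.flatMap (fun w => ["4", "7"].map (fun d => w ++ d))

def pow47 : Nat → List String
  | 0 => [""]
  | n + 1 => stepW (pow47 n)

def bfs : Nat → List String
  | 0 => []
  | n + 1 => bfs n ++ pow47 (n + 1)

theorem funcAuxA_eq_dfs (n : Nat) : ∀ (pre : String),
    funcAuxA n pre = (dfs n).map (fun s => (PySem.Int.ofStr? (pre ++ s)).getD 0) := by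
  induction n with
  | zero => intro pre; simp [funcAuxA, dfs]
  | succ n ih =>
      intro pre
      simp [funcAuxA, dfs, ih, List.map_append, List.map_map, Function.comp_def,
            String.append_assoc]

theorem foldl_layers (f : List String × List String → Int → List String × List String)
    (hf : f = fun st _ =>
        let words := st.2.flatMap (fun w => ["4", "7"].map (fun d => w ++ d))
        (st.1 ++ words, words)) :
    ∀ (l : List Int) (k : Nat),
      l.foldl f (bfs k, pow47 k) = (bfs (k + l.length), pow47 (k + l.length)) := by
  intro l
  induction l with
  | nil => intro k; simp
  | cons a t ih =>
      intro k
      have hstep : f (bfs k, pow47 k) a = (bfs (k + 1), pow47 (k + 1)) := by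
        subst hf; simp [bfs, pow47, stepW]
      calc (a :: t).foldl f (bfs k, pow47 k)
          = t.foldl f (bfs (k + 1), pow47 (k + 1)) := by rw [List.foldl_cons, hstep]
        _ = (bfs (k + 1 + t.length), pow47 (k + 1 + t.length)) := ih (k + 1)
        _ = (bfs (k + (a :: t).length), pow47 (k + (a :: t).length)) := by
              simp [List.length_cons]; constructor <;> congr 1 <;> omega

theorem len_pyRange (n : Int) : (PySem.List.pyRange 0 n 1).length = n.toNat := by
  simp [PySem.List.pyRange]
  intro h
  omega

theorem func_alt_eq (count : Int) (pre : String) :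
    func_alt count pre =
      (PySem.List.sorted (bfs count.toNat) (fun s => s) false).map
        (fun s => (PySem.Int.ofStr? (pre ++ s)).getD 0) := by
  show (PySem.List.sorted ((PySem.List.pyRange 0 count 1).foldl _ ([], [""])).1 _ false).map _ = _
  rw [show (([], [""]) : List String × List String) = (bfs 0, pow47 0) from rfl,
      foldl_layers _ rfl, len_pyRange]
  simp

-- toList facts for the two digit prefixes
theorem toList_app4 (x : String) : ("4" ++ x).toList = '4' :: x.toList := by
  simp [String.toList_append]
theorem toList_app7 (x : String) : ("7" ++ x).toList = '7' :: x.toList := by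
  simp [String.toList_append]

theorem strLt_of_lex {s t : String} (h : List.Lex (· < ·) s.toList t.toList) : s < t := by
  rw [String.lt_iff_toList_lt]
  exact (List.lt_iff_lex_lt _ _).mpr h

theorem lex_of_strLt {s t : String} (h : s < t) : List.Lex (· < ·) s.toList t.toList := by
  rw [String.lt_iff_toList_lt] at h
  exact (List.lt_iff_lex_lt _ _).mp h

theorem lt_44 {x y : String} (h : x < y) : "4" ++ x < "4" ++ y := by
  apply strLt_of_lex
  rw [toList_app4, toList_app4]
  exact List.Lex.cons (lex_of_strLt h)

theorem lt_77 {x y : String} (h : x < y) : "7" ++ x < "7" ++ y := by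
  apply strLt_of_lex
  rw [toList_app7, toList_app7]
  exact List.Lex.cons (lex_of_strLt h)

theorem toList_ne_nil {x : String} (h : x ≠ "") : x.toList ≠ [] := by
  intro hc
  apply h
  simpa using hc

theorem lt_4x {x : String} (h : x ≠ "") : "4" < "4" ++ x := by
  apply strLt_of_lex
  rw [toList_app4]
  show List.Lex _ ['4'] _
  cases hx : x.toList with
  | nil => exact absurd hx (toList_ne_nil h)
  | cons c l => exact List.Lex.cons List.Lex.nil

theorem lt_7x {x : String} (h : x ≠ "") : "7" < "7" ++ x := by
  apply strLt_of_lex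
  rw [toList_app7]
  show List.Lex _ ['7'] _
  cases hx : x.toList with
  | nil => exact absurd hx (toList_ne_nil h)
  | cons c l => exact List.Lex.cons List.Lex.nil

theorem lt_x47 (x y : String) : "4" ++ x < "7" ++ y := by
  apply strLt_of_lex
  rw [toList_app4, toList_app7]
  exact List.Lex.rel (by decide)

theorem lt_4_7x (y : String) : "4" < "7" ++ y := by
  apply strLt_of_lex
  rw [toList_app7]
  exact List.Lex.rel (by decide)

theorem lt_4_7 : ("4" : String) < "7" := by
  simpa using lt_4_7x ""

theorem lt_4x_7 (x : String) : "4" ++ x < "7" := by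
  apply strLt_of_lex
  rw [toList_app4]
  exact List.Lex.rel (by decide)

theorem app_ne_empty (c x : String) (hc : c ≠ "") : c ++ x ≠ "" := by
  intro h
  have h2 : c = "" ∧ x = "" := by simpa using congrArg String.toList h
  exact hc h2.1

theorem dfs_ne_nil (n : Nat) : ∀ s ∈ dfs n, s ≠ "" := by
  induction n with
  | zero => intro s hs; simp [dfs] at hs
  | succ n ih =>
      intro s hs
      simp only [dfs, List.mem_cons, List.mem_append, List.mem_map] at hs
      rcases hs with h | ⟨x, _, rfl⟩ | h | ⟨x, _, rfl⟩
      · subst h; decide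
      · exact app_ne_empty _ _ (by decide)
      · subst h; decide
      · exact app_ne_empty _ _ (by decide)

theorem dfs_pairwise (n : Nat) : (dfs n).Pairwise (· < ·) := by
  induction n with
  | zero => simp [dfs]
  | succ n ih =>
      have hne := dfs_ne_nil n
      refine List.pairwise_cons.mpr ⟨?_, ?_⟩
      · intro b hb
        simp only [List.mem_append, List.mem_cons, List.mem_map] at hb
        rcases hb with ⟨x, hx, rfl⟩ | h | ⟨x, hx, rfl⟩
        · exact lt_4x (hne x hx)
        · subst h; exact lt_4_7
        · exact lt_4_7x x
      · refine List.pairwise_append.mpr ⟨?_, ?_, ?_⟩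
        · exact List.Pairwise.map _ (fun _ _ h => lt_44 h) ih
        · refine List.pairwise_cons.mpr ⟨?_, ?_⟩
          · intro b hb
            rcases List.mem_map.mp hb with ⟨x, hx, rfl⟩
            exact lt_7x (hne x hx)
          · exact List.Pairwise.map _ (fun _ _ h => lt_77 h) ih
        · intro a ha b hb
          rcases List.mem_map.mp ha with ⟨x, _, rfl⟩
          rcases List.mem_cons.mp hb with h | hb'
          · subst h; exact lt_4x_7 x
          · rcases List.mem_map.mp hb' with ⟨y, _, rfl⟩
            exact lt_x47 x y

theorem stepW_map (c : String) (P : List String) :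
    stepW (P.map (c ++ ·)) = (stepW P).map (c ++ ·) := by
  simp [stepW, List.flatMap_map, List.map_flatMap,
        String.append_assoc]

theorem pow47_perm : ∀ n : Nat,
    (pow47 (n + 1)).Perm ((pow47 n).map ("4" ++ ·) ++ (pow47 n).map ("7" ++ ·)) := by
  intro n
  induction n with
  | zero =>
      rw [show pow47 1 = ((pow47 0).map ("4" ++ ·) ++ (pow47 0).map ("7" ++ ·)) by
        simp [pow47, stepW]]
  | succ n ih =>
      have h1 : (pow47 (n + 2)).Perm
          (stepW ((pow47 n).map ("4" ++ ·) ++ (pow47 n).map ("7" ++ ·))) := by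
        show (stepW (pow47 (n + 1))).Perm _
        exact List.Perm.flatMap ih (fun a _ => List.Perm.refl _)
      have h2 : stepW ((pow47 n).map ("4" ++ ·) ++ (pow47 n).map ("7" ++ ·))
          = (pow47 (n + 1)).map ("4" ++ ·) ++ (pow47 (n + 1)).map ("7" ++ ·) := by
        show List.flatMap _ _ = _
        rw [List.flatMap_append]
        show stepW ((pow47 n).map ("4" ++ ·)) ++ stepW ((pow47 n).map ("7" ++ ·)) = _
        rw [stepW_map, stepW_map]
        rfl
      exact h1.trans (h2 ▸ List.Perm.refl _)

theorem perm_interleave {α : Type} (a b c d : List α) :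
    ((a ++ b) ++ (c ++ d)).Perm ((a ++ c) ++ (b ++ d)) := by
  have h2 : ((b ++ c) ++ d).Perm ((c ++ b) ++ d) :=
    List.Perm.append_right d List.perm_append_comm
  have h3 : (b ++ (c ++ d)).Perm (c ++ (b ++ d)) := by
    simpa [List.append_assoc] using h2
  simpa [List.append_assoc] using h3.append_left a

theorem bfs_succ_perm : ∀ n : Nat,
    (bfs (n + 1)).Perm
      ((["4"] ++ (bfs n).map ("4" ++ ·)) ++ (["7"] ++ (bfs n).map ("7" ++ ·))) := by
  intro n
  induction n with
  | zero =>
      rw [show bfs 1 = (["4"] ++ (bfs 0).map ("4" ++ ·)) ++ (["7"] ++ (bfs 0).map ("7" ++ ·)) by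
        simp [bfs, pow47, stepW]]
  | succ n ih =>
      have hp := pow47_perm (n + 1)
      have step : (bfs (n + 2)).Perm
          (((["4"] ++ (bfs n).map ("4" ++ ·)) ++ (["7"] ++ (bfs n).map ("7" ++ ·)))
            ++ ((pow47 (n + 1)).map ("4" ++ ·) ++ (pow47 (n + 1)).map ("7" ++ ·))) :=
        List.Perm.append ih hp
      have heq : ((["4"] ++ (bfs n).map ("4" ++ ·)) ++ (pow47 (n + 1)).map ("4" ++ ·))
            ++ ((["7"] ++ (bfs n).map ("7" ++ ·)) ++ (pow47 (n + 1)).map ("7" ++ ·))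
          = (["4"] ++ (bfs (n + 1)).map ("4" ++ ·)) ++ (["7"] ++ (bfs (n + 1)).map ("7" ++ ·)) := by
        simp [bfs, List.map_append, List.append_assoc]
      rw [← heq]
      exact step.trans (perm_interleave _ _ _ _)

theorem bfs_perm_dfs : ∀ n : Nat, (bfs n).Perm (dfs n) := by
  intro n
  induction n with
  | zero => exact List.Perm.refl []
  | succ n ih =>
      refine (bfs_succ_perm n).trans ?_
      have heq : (dfs (n + 1)) =
          (["4"] ++ (dfs n).map ("4" ++ ·)) ++ (["7"] ++ (dfs n).map ("7" ++ ·)) := by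
        simp [dfs]
      rw [heq]
      exact List.Perm.append (List.Perm.append (List.Perm.refl _) (ih.map _))
        (List.Perm.append (List.Perm.refl _) (ih.map _))

theorem sorted_bfs (n : Nat) :
    PySem.List.sorted (bfs n) (fun s => s) false = dfs n := by
  exact PySem.List.sorted_eq_of_perm_of_pairwise_lt _ _ _
    (bfs_perm_dfs n).symm (dfs_pairwise n)

-- ===== VERDICT (by name: the statement is the Claim_ definition above) =====
theorem func_spec : Claim_equal_func := by
  intro count pre _ _
  unfold Spec_func func
  rw [funcAuxA_eq_dfs, func_alt_eq, sorted_bfs]
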